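-- pv_equiv track=rewrite | github.com/pwysocka26-ai/jarvis-app_v2 | app/b2c/context_ai.py | _time_profile_from_timed
-- ===== SOURCE A (Python) =====
-- from typing import Any, Dict, List, Optional, Tuple
--
-- def _time_profile_from_timed(timed: List[Tuple[int, Dict[str, Any]]]) -> Dict[str, int]:
--     out = {"morning": 0, "afternoon": 0, "evening": 0}
--     for start, _ in timed:
--         if start < 12 * 60:
--             out["morning"] += 1
--         elif start < 18 * 60:
--             out["afternoon"] += 1
--         else:
--             out["evening"] += 1
--     return out
-- ===== SOURCE B (Python) =====
-- def _time_profile_from_timed(timed):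
--     labels = ["morning", "afternoon", "evening"]
--     buckets = [sum(1 for b in (720, 1080) if b <= start) for start, _ in timed]
--     return {lab: buckets.count(i) for i, lab in enumerate(labels)}
-- ===== Notes on version B (the rewrite author's own statement) =====
-- stated objective: idiomatic
-- what changed: Replaces the if/elif/else cascade over a mutated dict with a threshold-counting index (number of bounds <= start) per item and a dict comprehension that counts each bucket index, so the result dict is built in one expression instead of updated in place.
import Mathlib
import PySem

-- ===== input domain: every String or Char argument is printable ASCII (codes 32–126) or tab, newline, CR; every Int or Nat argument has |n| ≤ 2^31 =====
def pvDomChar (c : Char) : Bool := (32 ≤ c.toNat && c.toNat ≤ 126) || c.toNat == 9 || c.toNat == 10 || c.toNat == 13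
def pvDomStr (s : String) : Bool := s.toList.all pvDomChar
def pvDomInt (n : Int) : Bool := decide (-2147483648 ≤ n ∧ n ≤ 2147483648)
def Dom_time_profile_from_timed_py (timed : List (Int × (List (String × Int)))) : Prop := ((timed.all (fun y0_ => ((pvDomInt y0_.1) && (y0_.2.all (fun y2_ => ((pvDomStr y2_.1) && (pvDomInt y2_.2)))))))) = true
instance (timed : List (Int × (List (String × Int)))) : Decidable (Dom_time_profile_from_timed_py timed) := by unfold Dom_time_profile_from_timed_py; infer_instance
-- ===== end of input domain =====

-- B replaces A's if/elif dict-mutation loop with a threshold-count bucket index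
-- plus a per-label count comprehension (idiomatic; same O(n) cost).

-- ===== PORT A =====
-- literal transliteration: dict of three zero counts, then for each (start,_)
-- an if/elif/else incrementing one entry (out[k] += 1 = modify with the key present).
def time_profile_from_timed_py (timed : List (Int × (List (String × Int)))) : List (String × Int) :=
  (timed.foldl
    (fun out p =>
      if p.1 < 12 * 60 then out.modify "morning" 0 (· + 1)
      else if p.1 < 18 * 60 then out.modify "afternoon" 0 (· + 1)
      else out.modify "evening" 0 (· + 1))
    (PySem.Dict.ofList [("morning", (0 : Int)), ("afternoon", 0), ("evening", 0)])).items

-- ===== PORT B =====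
-- bucket index = number of bounds ≤ start (sum of 1s ported as countP);
-- result = {lab: buckets.count(i) for i, lab in enumerate(labels)}.
def time_profile_from_timed_py_alt (timed : List (Int × (List (String × Int)))) : List (String × Int) :=
  let labels : List String := ["morning", "afternoon", "evening"]
  let buckets : List Int :=
    timed.map (fun p => (([(720 : Int), 1080].countP (fun b => b ≤ p.1)) : Int))
  (PySem.List.enumerate labels).map (fun il => (il.2, (buckets.count il.1 : Int)))

-- ===== PRECONDITION & SPEC =====
def Spec_time_profile_from_timed_py (timed : List (Int × (List (String × Int)))) (out : List (String × Int)) : Prop := out = time_profile_from_timed_py_alt timed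
instance (timed : List (Int × (List (String × Int)))) (out : List (String × Int)) : Decidable (Spec_time_profile_from_timed_py timed out) := by unfold Spec_time_profile_from_timed_py; infer_instance

-- ===== CLAIM (what is proved, stated in full; the proofs are below) =====
def Claim_equal_time_profile_from_timed_py : Prop := ∀ (timed : List (Int × (List (String × Int)))), Dom_time_profile_from_timed_py timed → Spec_time_profile_from_timed_py timed (time_profile_from_timed_py timed)

-- ===== LEMMAS AND PROOFS =====

-- B's bucket index of a start time
def pvIdx (s : Int) : Int := (([(720 : Int), 1080].countP (fun b => b ≤ s)) : Int)

theorem pvIdx0 (s : Int) (h : s < 720) : pvIdx s = 0 := by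
  have h1 : ¬ (720 : Int) ≤ s := by omega
  have h2 : ¬ (1080 : Int) ≤ s := by omega
  simp [pvIdx, List.countP_cons, h1, h2]

theorem pvIdx1 (s : Int) (h : ¬ s < 720) (h' : s < 1080) : pvIdx s = 1 := by
  have h1 : (720 : Int) ≤ s := by omega
  have h2 : ¬ (1080 : Int) ≤ s := by omega
  simp [pvIdx, List.countP_cons, h1, h2]

theorem pvIdx2 (s : Int) (h : ¬ s < 1080) : pvIdx s = 2 := by
  have h1 : (720 : Int) ≤ s := by omega
  have h2 : (1080 : Int) ≤ s := by omega
  simp [pvIdx, List.countP_cons, h1, h2]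

theorem pvModM (a b c : Int) :
    (PySem.Dict.ofList [("morning", a), ("afternoon", b), ("evening", c)]).modify "morning" 0 (· + 1)
    = PySem.Dict.ofList [("morning", a + 1), ("afternoon", b), ("evening", c)] := rfl

theorem pvModA (a b c : Int) :
    (PySem.Dict.ofList [("morning", a), ("afternoon", b), ("evening", c)]).modify "afternoon" 0 (· + 1)
    = PySem.Dict.ofList [("morning", a), ("afternoon", b + 1), ("evening", c)] := rfl

theorem pvModE (a b c : Int) :
    (PySem.Dict.ofList [("morning", a), ("afternoon", b), ("evening", c)]).modify "evening" 0 (· + 1)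
    = PySem.Dict.ofList [("morning", a), ("afternoon", b), ("evening", c + 1)] := rfl

-- generalized closed form of A's fold
theorem pvFoldA (timed : List (Int × (List (String × Int)))) : ∀ (a b c : Int),
    (timed.foldl
      (fun out p =>
        if p.1 < 12 * 60 then out.modify "morning" 0 (· + 1)
        else if p.1 < 18 * 60 then out.modify "afternoon" 0 (· + 1)
        else out.modify "evening" 0 (· + 1))
      (PySem.Dict.ofList [("morning", a), ("afternoon", b), ("evening", c)])).items =
    [("morning", a + ((timed.map (fun p => pvIdx p.1)).count 0 : Int)),
     ("afternoon", b + ((timed.map (fun p => pvIdx p.1)).count 1 : Int)),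
     ("evening", c + ((timed.map (fun p => pvIdx p.1)).count 2 : Int))] := by
  induction timed with
  | nil => intro a b c; simp; rfl
  | cons hd tl ih =>
    intro a b c
    simp only [List.foldl_cons, List.map_cons]
    by_cases h1 : hd.1 < 12 * 60
    · rw [if_pos h1, pvModM, ih, pvIdx0 hd.1 (by omega)]
      simp [List.count_cons]
      omega
    · rw [if_neg h1]
      by_cases h2 : hd.1 < 18 * 60
      · rw [if_pos h2, pvModA, ih, pvIdx1 hd.1 (by omega) (by omega)]
        simp [List.count_cons]
        omega
      · rw [if_neg h2, pvModE, ih, pvIdx2 hd.1 (by omega)]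
        simp [List.count_cons]
        omega

-- ===== VERDICT (by name: the statement is the Claim_ definition above) =====
theorem time_profile_from_timed_py_spec : Claim_equal_time_profile_from_timed_py := by
  intro timed _
  unfold Spec_time_profile_from_timed_py time_profile_from_timed_py time_profile_from_timed_py_alt
  rw [pvFoldA]
  simp [PySem.List.enumerate, pvIdx]
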